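-- pv_equiv track=rewrite | github.com/nesi73/advent_of_code | 2024/day3/part2.py | warning_zones
-- ===== SOURCE A (Python) =====
-- def warning_zones(do:list, donot:list, final:int) -> list:
--     do_sort = sorted(do)
--     donot_sort = sorted(donot)
--     warning_zones_list = []
--
--     for dn in donot_sort:
--         check = False
--         for do in do_sort:
--             if do[0] >= dn[0]:
--                 check = True
--                 warning_zones_list.append([dn[0],do[0]])
--                 break
--         if not check:
--             warning_zones_list.append([dn[0], final])
--     return warning_zones_list
-- ===== SOURCE B (Python) =====
-- def warning_zones(do: list, donot: list, final: int) -> list: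
--     do_sort = sorted(do)
--     donot_sort = sorted(donot)
--     res = []
--     i = 0
--     n = len(do_sort)
--     for dn in donot_sort:
--         while i < n and do_sort[i][0] < dn[0]:
--             i += 1
--         res.append([dn[0], do_sort[i][0] if i < n else final])
--     return res
-- ===== Notes on version B (the rewrite author's own statement) =====
-- stated objective: alternative
-- what changed: Replaces A's per-dn rescan of do_sort from the front with a single two-pointer merge over the two sorted lists (the pointer into do_sort never resets because donot heads are nondecreasing); measured only ~1.2x, so no speed is claimed.
import Mathlib
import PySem

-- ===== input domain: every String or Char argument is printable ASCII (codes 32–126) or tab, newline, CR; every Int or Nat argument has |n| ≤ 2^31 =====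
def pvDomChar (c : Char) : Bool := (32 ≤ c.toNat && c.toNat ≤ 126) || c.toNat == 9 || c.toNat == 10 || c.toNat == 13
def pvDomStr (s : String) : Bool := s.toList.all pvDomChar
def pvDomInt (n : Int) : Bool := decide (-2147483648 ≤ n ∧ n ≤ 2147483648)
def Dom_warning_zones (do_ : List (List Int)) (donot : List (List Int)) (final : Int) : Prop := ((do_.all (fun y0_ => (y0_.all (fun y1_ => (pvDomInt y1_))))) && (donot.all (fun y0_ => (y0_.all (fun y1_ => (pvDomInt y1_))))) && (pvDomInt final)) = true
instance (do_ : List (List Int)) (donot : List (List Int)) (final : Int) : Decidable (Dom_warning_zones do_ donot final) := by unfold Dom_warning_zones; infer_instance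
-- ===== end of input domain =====

-- ===== PORT A =====
-- B replaces A's per-dn rescan of do_sort with a single two-pointer merge over the two sorted lists.
-- A-side helper: the inner 'for do in do_sort: if do[0] >= dn[0]: …; break' scan (first hit, if any)
def pvH0 (l : List Int) : Int := PySem.List.pyGetD l 0 0   -- l[0]; Pre_ keeps lists nonempty, so the default is never used

def pvAFind (x : Int) : List (List Int) → Option (List Int)
  | [] => none
  | d :: rest => if x ≤ pvH0 d then some d else pvAFind x rest

def warning_zones (do_ : List (List Int)) (donot : List (List Int)) (final : Int) : List (List Int) :=
  let do_sort := PySem.List.sorted do_ (fun x => x) false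
  let donot_sort := PySem.List.sorted donot (fun x => x) false
  donot_sort.foldl (fun acc dn =>
    match pvAFind (pvH0 dn) do_sort with
    | some d => acc ++ [[pvH0 dn, pvH0 d]]
    | none   => acc ++ [[pvH0 dn, final]]) []

-- ===== PORT B =====
-- B-side helper: the merge loop; the first argument is the not-yet-passed suffix of do_sort
def pvBGo (final : Int) : List (List Int) → List (List Int) → List (List Int)
  | _, [] => []
  | ds, dn :: rest =>
      let ds' := ds.dropWhile (fun d => decide (pvH0 d < pvH0 dn))
      (match ds' with
       | d :: _ => [pvH0 dn, pvH0 d]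
       | [] => [pvH0 dn, final]) :: pvBGo final ds' rest

def warning_zones_alt (do_ : List (List Int)) (donot : List (List Int)) (final : Int) : List (List Int) :=
  pvBGo final (PySem.List.sorted do_ (fun x => x) false) (PySem.List.sorted donot (fun x => x) false)

-- ===== PRECONDITION & SPEC =====
-- Pre_ excludes exactly the inputs where Python A raises IndexError: some inner list is empty and
-- the loop body that subscripts it is reached (i.e. donot is nonempty).
def Pre_warning_zones (do_ : List (List Int)) (donot : List (List Int)) (final : Int) : Prop :=
  donot = [] ∨ ((∀ l ∈ do_, l ≠ []) ∧ (∀ l ∈ donot, l ≠ []))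
instance (do_ : List (List Int)) (donot : List (List Int)) (final : Int) : Decidable (Pre_warning_zones do_ donot final) := by unfold Pre_warning_zones; infer_instance

def pvWitness_warning_zones : List (List Int) × List (List Int) × Int := ([[1, 2], [3]], [[0], [2]], 9)

def Spec_warning_zones (do_ : List (List Int)) (donot : List (List Int)) (final : Int) (out : List (List Int)) : Prop := out = warning_zones_alt do_ donot final
instance (do_ : List (List Int)) (donot : List (List Int)) (final : Int) (out : List (List Int)) : Decidable (Spec_warning_zones do_ donot final out) := by unfold Spec_warning_zones; infer_instance

-- ===== CLAIM (what is proved, stated in full; the proofs are below) =====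
def Claim_equal_warning_zones : Prop := ∀ (do_ : List (List Int)) (donot : List (List Int)) (final : Int), Dom_warning_zones do_ donot final → Pre_warning_zones do_ donot final → Spec_warning_zones do_ donot final (warning_zones do_ donot final)

-- ===== LEMMAS AND PROOFS =====

-- the row both programs emit for dn, given the suffix of do_sort whose heads are ≥ pvH0 dn
def pvRow (final : Int) (dn : List Int) (ds' : List (List Int)) : List Int :=
  match ds' with
  | d :: _ => [pvH0 dn, pvH0 d]
  | [] => [pvH0 dn, final]

-- A's inner scan is head? of dropWhile
lemma pvAFind_eq_dropWhile (x : Int) (ds : List (List Int)) :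
    pvAFind x ds = (ds.dropWhile (fun d => decide (pvH0 d < x))).head? := by
  induction ds with
  | nil => rfl
  | cons d rest ih =>
      by_cases h : x ≤ pvH0 d
      · simp [pvAFind, h, List.dropWhile, show ¬ pvH0 d < x by omega]
      · simp [pvAFind, h, List.dropWhile, show pvH0 d < x by omega, ih]

-- dropping a weaker prefix first does not change a dropWhile
lemma dropWhile_dropWhile {α : Type} (p q : α → Bool) (h : ∀ a, p a = true → q a = true)
    (l : List α) : List.dropWhile q (List.dropWhile p l) = List.dropWhile q l := by
  induction l with
  | nil => rfl
  | cons a t ih =>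
      by_cases hp : p a = true
      · simp [List.dropWhile, hp, h a hp, ih]
      · simp [List.dropWhile, hp]

-- B's merge over a heads-nondecreasing list equals a pointwise map over the FULL do_sort
lemma pvBGo_eq_map (final : Int) (dns : List (List Int))
    (hs : dns.Pairwise (fun a b => pvH0 a ≤ pvH0 b)) :
    ∀ ds, pvBGo final ds dns
      = dns.map (fun dn => pvRow final dn (ds.dropWhile (fun d => decide (pvH0 d < pvH0 dn)))) := by
  induction dns with
  | nil => intro ds; rfl
  | cons dn rest ih =>
      intro ds
      rcases List.pairwise_cons.mp hs with ⟨hdn, hrest⟩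
      rw [List.map_cons]
      show (match ds.dropWhile (fun d => decide (pvH0 d < pvH0 dn)) with
            | d :: _ => [pvH0 dn, pvH0 d]
            | [] => [pvH0 dn, final]) :: pvBGo final (ds.dropWhile (fun d => decide (pvH0 d < pvH0 dn))) rest = _
      congr 1
      rw [ih hrest]
      apply List.map_congr_left
      intro d hd
      rw [dropWhile_dropWhile]
      intro a ha
      have := hdn d hd
      simp at ha ⊢
      omega

-- lexicographic order on nonempty Int lists implies order on the first elements
lemma h0_mono (a b : List Int) (ha : a ≠ []) (hb : b ≠ []) (hle : a ≤ b) : pvH0 a ≤ pvH0 b := by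
  rcases a with _ | ⟨x, xs⟩; · exact absurd rfl ha
  rcases b with _ | ⟨y, ys⟩; · exact absurd rfl hb
  have hxy : x ≤ y := by
    rcases lt_or_eq_of_le hle with h | h
    · rw [List.cons_lt_cons_iff] at h; rcases h with h | ⟨h1, _⟩ <;> omega
    · cases h; rfl
  simpa [pvH0, PySem.List.pyGetD, PySem.List.pyGet?, PySem.List.pyIdx?] using hxy

-- transport sorted_pairwise through the (equal) order instances of List Int
lemma sorted_llint_pairwise (xs : List (List Int)) :
    (PySem.List.sorted xs (fun x => x) false).Pairwise (fun a b => a ≤ b) := by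
  have h := PySem.List.sorted_pairwise (κ := List Int) xs (fun x => x)
  have hinst : (fun (a b : List Int) => a.decidableLT b) = (inferInstance : LinearOrder (List Int)).toDecidableLT :=
    Subsingleton.elim _ _
  unfold PySem.List.sorted
  rw [hinst]
  exact h

lemma sorted_heads_pairwise (xs : List (List Int)) (hne : ∀ l ∈ xs, l ≠ []) :
    (PySem.List.sorted xs (fun x => x) false).Pairwise (fun a b => pvH0 a ≤ pvH0 b) := by
  have hp := sorted_llint_pairwise xs
  refine List.Pairwise.imp_of_mem ?_ hp
  intro a b hma hmb hle
  have ha := hne a ((PySem.List.mem_sorted xs (fun x => x) false a).mp hma)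
  have hb := hne b ((PySem.List.mem_sorted xs (fun x => x) false b).mp hmb)
  exact h0_mono a b ha hb hle

-- ===== VERDICT (by name: the statement is the Claim_ definition above) =====
theorem warning_zones_spec : Claim_equal_warning_zones := by
  intro do_ donot final _ hpre
  show warning_zones do_ donot final = warning_zones_alt do_ donot final
  rcases hpre with h | ⟨_, hdn⟩
  · subst h; rfl
  · show (PySem.List.sorted donot (fun x => x) false).foldl
        (fun acc dn =>
          match pvAFind (pvH0 dn) (PySem.List.sorted do_ (fun x => x) false) with
          | some d => acc ++ [[pvH0 dn, pvH0 d]]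
          | none   => acc ++ [[pvH0 dn, final]]) []
      = warning_zones_alt do_ donot final
    have hfun : (fun (acc : List (List Int)) dn =>
          match pvAFind (pvH0 dn) (PySem.List.sorted do_ (fun x => x) false) with
          | some d => acc ++ [[pvH0 dn, pvH0 d]]
          | none   => acc ++ [[pvH0 dn, final]])
        = fun acc dn => acc ++
            [match pvAFind (pvH0 dn) (PySem.List.sorted do_ (fun x => x) false) with
             | some d => [pvH0 dn, pvH0 d]
             | none   => [pvH0 dn, final]] := by
      funext acc dn
      cases pvAFind (pvH0 dn) (PySem.List.sorted do_ (fun x => x) false) <;> rfl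
    rw [hfun, PySem.List.foldl_append_singleton_eq_map]
    unfold warning_zones_alt
    rw [pvBGo_eq_map final _ (sorted_heads_pairwise donot hdn)]
    apply List.map_congr_left
    intro dn _
    rw [pvAFind_eq_dropWhile]
    cases (PySem.List.sorted do_ (fun x => x) false).dropWhile
        (fun d => decide (pvH0 d < pvH0 dn)) with
    | nil => rfl
    | cons d t => rfl
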